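-- pv_equiv track=rewrite | github.com/SSAFY-while-true/Hun-Hong | 202506_3/BOJ14890.py | calculate_road
-- ===== SOURCE A (Python) =====
-- def calculate_road(N, L, matrix):
--     h_info = [[] for _ in range(N)]
--
--     for i in range(N):
--         for j in range(N):
--             if j == 0:
--                 cur_h = matrix[i][j]
--                 count = 1
--                 continue
--
--             if cur_h == matrix[i][j]:
--                 count += 1
--
--             if  (cur_h != matrix[i][j]):
--                 h_info[i].append((cur_h, count))
--                 cur_h = matrix[i][j]
--                 count = 1
--
--             if (j == N - 1):
--                 h_info[i].append((cur_h, count))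
--
--     road_count = 0
--     for i in range(N):
--         for idx, (cur_h, cur_count) in enumerate(h_info[i]):
--             if idx == 0:
--                 continue
--
--             prev_h, prev_count = h_info[i][idx - 1]
--
--             if 2 > cur_h - prev_h > 0:
--                 if prev_count >= L:
--                     h_info[i][idx - 1] = (prev_h, prev_count - L)
--                 else:
--                     break
--             elif -2 < cur_h - prev_h < 0:
--                 if cur_count >= L:
--                     h_info[i][idx] = (cur_h, cur_count - L)
--                 else:
--                     break
--             else:
--                 break
--
--         else:
--             road_count += 1
--
--     return road_count
-- ===== SOURCE B (Python) =====
-- def calculate_road(N, L, matrix):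
--     road_count = 0
--     for i in range(N):
--         row = matrix[i][:N]
--         prev = row[0]
--         cnt = 1
--         ok = True
--         for cur in row[1:]:
--             d = cur - prev
--             if d == 0:
--                 cnt += 1
--             elif d == 1:
--                 if cnt >= L:
--                     cnt = 1
--                 else:
--                     ok = False
--                     break
--             elif d == -1:
--                 if cnt < 0:
--                     ok = False
--                     break
--                 cnt = 1 - L
--             else:
--                 ok = False
--                 break
--             prev = cur
--         if ok and cnt >= 0:
--             road_count += 1
--     return road_count
-- ===== Notes on version B (the rewrite author's own statement) =====
-- stated objective: simpler
-- what changed: B replaces A's two-phase per-row algorithm (build a run-length table, then rescan it with index arithmetic and in-place updates) by a single left-to-right streaming pass per row that maintains one integer counter (negative while a downhill ramp is still owed).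
import Mathlib
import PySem

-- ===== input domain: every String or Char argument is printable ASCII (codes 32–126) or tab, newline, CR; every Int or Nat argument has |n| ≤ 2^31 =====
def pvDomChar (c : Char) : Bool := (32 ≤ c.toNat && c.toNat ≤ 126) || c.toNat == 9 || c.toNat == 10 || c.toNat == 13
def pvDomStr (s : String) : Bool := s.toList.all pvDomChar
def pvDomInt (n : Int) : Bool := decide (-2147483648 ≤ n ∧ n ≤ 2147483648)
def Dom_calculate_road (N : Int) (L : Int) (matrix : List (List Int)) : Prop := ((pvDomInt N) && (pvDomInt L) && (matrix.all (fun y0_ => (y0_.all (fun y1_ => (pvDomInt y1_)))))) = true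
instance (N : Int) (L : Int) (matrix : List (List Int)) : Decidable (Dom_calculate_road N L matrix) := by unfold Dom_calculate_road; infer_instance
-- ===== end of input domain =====

-- B replaces A's two-phase "build a run-length table, then rescan and mutate it" with a single
-- streaming pass per row that keeps one integer counter (objective: simpler; no speed claim).

-- ===== PORT A =====
-- termination measures for the two loops of A (cited by name in decreasing_by)
theorem pv_measure_int {N j : Int} (h : j < N) : (N - (j + 1)).toNat < (N - j).toNat := by omega

theorem pv_measure_nat {n idx : Nat} (h : idx < n) : n - (idx + 1) < n - idx := by omega

theorem pv_measure_set {α : Type} (runs : List α) (i : Nat) (x : α) (idx : Nat)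
    (h : idx < runs.length) : (runs.set i x).length - (idx + 1) < runs.length - idx := by
  rw [List.length_set]; exact pv_measure_nat h

-- inner j-loop of phase 1 (run-length construction), j starting at 1 after the j==0 init
def runsLoop (row : List Int) (N : Int) (j : Int) (cur_h : Int) (count : Int)
    (acc : List (Int × Int)) : List (Int × Int) :=
  if _h : j < N then
    let v := (PySem.List.pyGet? row j).getD 0
    let count1 := if cur_h = v then count + 1 else count
    let hca : Int × Int × List (Int × Int) :=
      if cur_h ≠ v then (v, 1, acc ++ [(cur_h, count1)]) else (cur_h, count1, acc)
    let acc3 := if j = N - 1 then hca.2.2 ++ [(hca.1, hca.2.1)] else hca.2.2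
    runsLoop row N (j + 1) hca.1 hca.2.1 acc3
  else acc
termination_by (N - j).toNat
decreasing_by exact pv_measure_int _h

-- h_info[i] for one row (the j==0 iteration of Python's loop is the init; range(N) empty if N ≤ 0)
def buildRuns (row : List Int) (N : Int) : List (Int × Int) :=
  if 0 < N then runsLoop row N 1 ((PySem.List.pyGet? row 0).getD 0) 1 [] else []

-- phase 2: the enumerate loop over h_info[i] with in-place updates (List.set) and for-else
def crossLoop (L : Int) (runs : List (Int × Int)) (idx : Nat) : Bool :=
  if h : idx < runs.length then
    if idx = 0 then crossLoop L runs (idx + 1)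
    else
      let cur := runs[idx]
      let prev := runs[idx - 1]'(Nat.lt_of_le_of_lt (Nat.sub_le idx 1) h)
      let d := cur.1 - prev.1
      if 0 < d ∧ d < 2 then
        if L ≤ prev.2 then crossLoop L (runs.set (idx - 1) (prev.1, prev.2 - L)) (idx + 1)
        else false
      else if -2 < d ∧ d < 0 then
        if L ≤ cur.2 then crossLoop L (runs.set idx (cur.1, cur.2 - L)) (idx + 1)
        else false
      else false
  else true
termination_by runs.length - idx
decreasing_by
  · exact pv_measure_nat h
  · exact pv_measure_set _ _ _ _ h
  · exact pv_measure_set _ _ _ _ h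

def calculate_road (N : Int) (L : Int) (matrix : List (List Int)) : Int :=
  let h_info := (PySem.List.pyRange 0 N 1).map
    (fun i => buildRuns ((PySem.List.pyGet? matrix i).getD []) N)
  h_info.foldl (fun rc runs => if crossLoop L runs 0 then rc + 1 else rc) 0

-- ===== PORT B =====
-- the inner streaming loop of Source B: state (prev, cnt); none = "ok = False" (break)
def altRow (L : Int) (prev : Int) (cnt : Int) : List Int → Option Int
  | [] => some cnt
  | cur :: rest =>
    let d := cur - prev
    if d = 0 then altRow L cur (cnt + 1) rest
    else if d = 1 then (if L ≤ cnt then altRow L cur 1 rest else none)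
    else if d = -1 then (if cnt < 0 then none else altRow L cur (1 - L) rest)
    else none

def calculate_road_alt (N : Int) (L : Int) (matrix : List (List Int)) : Int :=
  (PySem.List.pyRange 0 N 1).foldl (fun rc i =>
    let row := PySem.List.slice ((PySem.List.pyGet? matrix i).getD []) none (some N)
    let prev := (PySem.List.pyGet? row 0).getD 0
    match altRow L prev 1 (PySem.List.slice row (some 1) none) with
    | some cnt => if 0 ≤ cnt then rc + 1 else rc
    | none => rc) 0

-- ===== PRECONDITION & SPEC =====
-- Pre_ excludes exactly the inputs where A raises IndexError: fewer than N rows, or one of the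
-- first N rows shorter than N.
def Pre_calculate_road (N : Int) (L : Int) (matrix : List (List Int)) : Prop :=
  N ≤ (matrix.length : Int) ∧ ∀ row ∈ matrix.take N.toNat, N ≤ (row.length : Int)
instance (N : Int) (L : Int) (matrix : List (List Int)) : Decidable (Pre_calculate_road N L matrix) := by
  unfold Pre_calculate_road; infer_instance

def pvWitness_calculate_road : Int × Int × List (List Int) := (2, 1, [[1, 1], [1, 2]])

def Spec_calculate_road (N : Int) (L : Int) (matrix : List (List Int)) (out : Int) : Prop := out = calculate_road_alt N L matrix
instance (N : Int) (L : Int) (matrix : List (List Int)) (out : Int) : Decidable (Spec_calculate_road N L matrix out) := by unfold Spec_calculate_road; infer_instance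

-- ===== CLAIM (what is proved, stated in full; the proofs are below) =====
def Claim_equal_calculate_road : Prop := ∀ (N : Int) (L : Int) (matrix : List (List Int)), Dom_calculate_road N L matrix → Pre_calculate_road N L matrix → Spec_calculate_road N L matrix (calculate_road N L matrix)

-- ===== LEMMAS AND PROOFS =====

-- structural (list-level) reading of A's phase 1: pending run (h, c), remaining elements;
-- the final element triggers the j == N-1 append
def bGo (h : Int) (c : Int) : List Int → List (Int × Int)
  | [] => []
  | v :: vs =>
    if h = v then (if vs = [] then [(h, c + 1)] else bGo h (c + 1) vs)
    else ((h, c) :: (if vs = [] then [(v, 1)] else bGo v 1 vs))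

-- structural reading of A's phase 2: previous run (ph, effective count pc), remaining runs
def runsScan (L : Int) (ph : Int) (pc : Int) : List (Int × Int) → Bool
  | [] => true
  | (h, c) :: rest =>
    let d := h - ph
    if 0 < d ∧ d < 2 then (if L ≤ pc then runsScan L h c rest else false)
    else if -2 < d ∧ d < 0 then (if L ≤ c then runsScan L h (c - L) rest else false)
    else false

def scanA (L : Int) : List (Int × Int) → Bool
  | [] => true
  | (h, c) :: rest => runsScan L h c rest

-- A's verdict continuation: pending run (h, full count so far c), entered by a descent or not
def ARuns (L : Int) (down : Bool) (h1 : Int) (c1 : Int) (rest : List (Int × Int)) : Bool :=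
  if down then (if L ≤ c1 then runsScan L h1 (c1 - L) rest else false) else runsScan L h1 c1 rest

def AsideOf (L : Int) (down : Bool) (h : Int) (c : Int) (xs : List Int) : Bool :=
  match bGo h c xs with
  | [] => true
  | (h1, c1) :: rest => ARuns L down h1 c1 rest

-- B's verdict: stream then final cnt ≥ 0 check
def BV (L : Int) (prev : Int) (cnt : Int) (xs : List Int) : Bool :=
  match altRow L prev cnt xs with
  | some c => decide (0 ≤ c)
  | none => false

theorem bGo_cons_fst (vs : List Int) : ∀ (v h c : Int), ∃ c1 rest, bGo h c (v :: vs) = (h, c1) :: rest := by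
  induction vs with
  | nil => intro v h c; by_cases hv : h = v <;> simp [bGo, hv]
  | cons w ws ih =>
    intro v h c
    by_cases hv : h = v
    · subst hv
      obtain ⟨c1, rest, hr⟩ := ih w h (c + 1)
      exact ⟨c1, rest, by rw [bGo]; simpa using hr⟩
    · exact ⟨c, bGo v 1 (w :: ws), by rw [bGo]; simp [hv]⟩

-- core: A's table scan equals B's streaming counter
theorem main_core (L : Int) (xs : List Int) : ∀ (v h c : Int) (down : Bool), 1 ≤ c →
    AsideOf L down h c (v :: xs) = BV L h (if down then c - L else c) (v :: xs) := by
  induction xs with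
  | nil =>
    intro v h c down hc
    by_cases hv : h = v
    · subst hv
      cases down <;> simp [AsideOf, bGo, ARuns, runsScan, BV, altRow]
      · omega
      · constructor <;> omega
    · by_cases h1 : v = h + 1
      · subst h1
        cases down <;> (simp [AsideOf, bGo, ARuns, runsScan, BV, altRow, hv]; split_ifs <;> simp_all <;> omega)
      · by_cases h2 : v = h - 1
        · subst h2
          cases down <;> (simp [AsideOf, bGo, ARuns, runsScan, BV, altRow, hv]; split_ifs <;> simp_all <;> omega)
        · cases down <;> (simp [AsideOf, bGo, ARuns, runsScan, BV, altRow, hv]; split_ifs <;> simp_all <;> omega)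
  | cons w ws ih =>
    intro v h c down hc
    by_cases hv : h = v
    · subst hv
      have hA : AsideOf L down h c (h :: w :: ws) = AsideOf L down h (c + 1) (w :: ws) := by
        simp only [AsideOf]; rw [bGo]; simp
      have hB : ∀ pc, BV L h pc (h :: w :: ws) = BV L h (pc + 1) (w :: ws) := by
        intro pc; simp only [BV]; rw [altRow]; simp
      rw [hA, hB]
      cases down
      · simpa using ih w h (c + 1) false (by omega)
      · have := ih w h (c + 1) true (by omega)
        rw [show c + 1 - L = c - L + 1 by ring] at this
        simpa using this
    · by_cases h1 : v = h + 1
      · subst h1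
        obtain ⟨c1, rest, hbg⟩ := bGo_cons_fst ws w (h + 1) 1
        have hA : AsideOf L down h c ((h + 1) :: w :: ws)
            = ARuns L down h c ((h + 1, c1) :: rest) := by
          simp only [AsideOf]; rw [bGo]; simp [hv, hbg]
        have hstep : ∀ pc, runsScan L h pc ((h + 1, c1) :: rest)
            = (if L ≤ pc then ARuns L false (h + 1) c1 rest else false) := by
          intro pc
          rw [runsScan]
          simp only [ARuns]
          norm_num
        have hIH : ARuns L false (h + 1) c1 rest = BV L (h + 1) 1 (w :: ws) := by
          have := ih w (h + 1) 1 false (by omega)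
          simpa [AsideOf, hbg] using this
        have hB : BV L h (if down then c - L else c) ((h + 1) :: w :: ws)
            = (if L ≤ (if down then c - L else c) then BV L (h + 1) 1 (w :: ws) else false) := by
          simp only [BV]; rw [altRow]
          simp only [show (h + 1 : Int) - h = 1 by ring]
          rw [if_neg (by norm_num : ¬(1 : Int) = 0), if_pos trivial]
          split_ifs <;> simp
        rw [hA, hB, ← hIH]
        cases down with
        | false =>
          rw [show ARuns L false h c ((h + 1, c1) :: rest)
              = runsScan L h c ((h + 1, c1) :: rest) from rfl, hstep c]
          simp
        | true =>
          rw [show ARuns L true h c ((h + 1, c1) :: rest)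
              = (if L ≤ c then runsScan L h (c - L) ((h + 1, c1) :: rest) else false) from rfl,
            hstep (c - L)]
          simp only [if_true]
          split_ifs <;> first | rfl | omega
      · by_cases h2 : v = h - 1
        · subst h2
          obtain ⟨c1, rest, hbg⟩ := bGo_cons_fst ws w (h - 1) 1
          have hA : AsideOf L down h c ((h - 1) :: w :: ws)
              = ARuns L down h c ((h - 1, c1) :: rest) := by
            simp only [AsideOf]; rw [bGo]; simp [hv, hbg]
          have hstep : ∀ pc, runsScan L h pc ((h - 1, c1) :: rest)
              = ARuns L true (h - 1) c1 rest := by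
            intro pc
            rw [runsScan]
            simp only [ARuns]
            norm_num
          have hIH : ARuns L true (h - 1) c1 rest = BV L (h - 1) (1 - L) (w :: ws) := by
            have := ih w (h - 1) 1 true (by omega)
            simpa [AsideOf, hbg] using this
          have hB : BV L h (if down then c - L else c) ((h - 1) :: w :: ws)
              = (if (if down then c - L else c) < 0 then false else BV L (h - 1) (1 - L) (w :: ws)) := by
            simp only [BV]; rw [altRow]
            simp only [show (h - 1 : Int) - h = -1 by ring]
            rw [if_neg (by norm_num : ¬(-1 : Int) = 0), if_neg (by norm_num : ¬(-1 : Int) = 1),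
              if_pos trivial]
            split_ifs <;> simp
          rw [hA, hB, ← hIH]
          cases down with
          | false =>
            rw [show ARuns L false h c ((h - 1, c1) :: rest)
                = runsScan L h c ((h - 1, c1) :: rest) from rfl, hstep c]
            simp only [show (false = true) = False by simp, if_false]
            rw [if_neg (by omega : ¬ c < 0)]
          | true =>
            rw [show ARuns L true h c ((h - 1, c1) :: rest)
                = (if L ≤ c then runsScan L h (c - L) ((h - 1, c1) :: rest) else false) from rfl,
              hstep (c - L)]
            simp only [if_true]
            split_ifs <;> first | rfl | omega
        · -- |v - h| ≥ 2 (and v ≠ h): both sides false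
          obtain ⟨c1, rest, hbg⟩ := bGo_cons_fst ws w v 1
          have hA : AsideOf L down h c (v :: w :: ws) = ARuns L down h c ((v, c1) :: rest) := by
            simp only [AsideOf]; rw [bGo]; simp [hv, hbg]
          have hfalse : ∀ pc, runsScan L h pc ((v, c1) :: rest) = false := by
            intro pc
            rw [runsScan]
            have hn1 : ¬ (0 < v - h ∧ v - h < 2) := by omega
            have hn2 : ¬ (-2 < v - h ∧ v - h < 0) := by omega
            rw [if_neg hn1, if_neg hn2]
          have hB : BV L h (if down then c - L else c) (v :: w :: ws) = false := by
            simp only [BV]; rw [altRow]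
            rw [if_neg (by omega : ¬ v - h = 0), if_neg (by omega : ¬ v - h = 1),
              if_neg (by omega : ¬ v - h = -1)]
          rw [hA, hB]
          cases down with
          | false =>
            rw [show ARuns L false h c ((v, c1) :: rest)
                = runsScan L h c ((v, c1) :: rest) from rfl, hfalse c]
          | true =>
            rw [show ARuns L true h c ((v, c1) :: rest)
                = (if L ≤ c then runsScan L h (c - L) ((v, c1) :: rest) else false) from rfl,
              hfalse (c - L)]
            simp

-- phase-1 glue: the index loop builds bGo of the first-N prefix
theorem runsLoop_eq (row : List Int) (N : Int) : ∀ (k : Nat) (j h c : Int) (acc : List (Int × Int)),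
    0 < j → j ≤ N → N ≤ (row.length : Int) → k = (N - j).toNat →
    runsLoop row N j h c acc = acc ++ bGo h c ((row.take N.toNat).drop j.toNat) := by
  intro k
  induction k with
  | zero =>
    intro j h c acc h0 hjN hlen hk
    have hjN' : j = N := by omega
    rw [runsLoop]
    rw [dif_neg (by omega : ¬ j < N)]
    have : (row.take N.toNat).drop j.toNat = [] := by
      apply List.drop_eq_nil_of_le
      simp
      omega
    rw [this]
    simp [bGo]
  | succ k ihk =>
    intro j h c acc h0 hjN hlen hk
    have hjlt : j < N := by omega
    have hjnat : j.toNat < (row.take N.toNat).length := by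
      simp; omega
    have hdropc : (row.take N.toNat).drop j.toNat
        = (row.take N.toNat)[j.toNat] :: (row.take N.toNat).drop (j.toNat + 1) :=
      List.drop_eq_getElem_cons hjnat
    have hel : (row.take N.toNat)[j.toNat]'hjnat = row[j.toNat]'(by simp at hjnat; omega) :=
      List.getElem_take
    have hv : (PySem.List.pyGet? row j).getD 0 = row[j.toNat]'(by simp at hjnat; omega) := by
      rw [PySem.List.pyGet?_of_nonneg row (by omega : (0 : Int) ≤ j)]
      rw [List.getElem?_eq_getElem (by simp at hjnat; omega)]
      rfl
    set v := row[j.toNat]'(by simp at hjnat; omega) with hvdef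
    have hlast : (j = N - 1) ↔ ((row.take N.toNat).drop (j.toNat + 1) = []) := by
      rw [List.drop_eq_nil_iff]
      simp
      omega
    rw [runsLoop]
    rw [dif_pos hjlt]
    simp only [hv, hdropc, hel]
    by_cases hhv : h = v
    · -- equal step: no append, count+1
      simp only [if_neg (by simpa using hhv : ¬ h ≠ v), if_pos hhv]
      by_cases hl : j = N - 1
      · -- last element
        rw [if_pos hl]
        rw [runsLoop, dif_neg (by omega : ¬ j + 1 < N)]
        rw [bGo]
        rw [if_pos hhv, if_pos (hlast.mp hl)]
      · rw [if_neg hl]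
        rw [bGo, if_pos hhv, if_neg (fun hnil => hl (hlast.mpr hnil))]
        have := ihk (j + 1) h (c + 1) acc (by omega) (by omega) hlen (by omega)
        rw [show ((j : Int) + 1).toNat = j.toNat + 1 by omega] at this
        exact this
    · -- unequal: append (h, count), start run (v, 1)
      simp only [if_pos (by simpa using hhv : h ≠ v), if_neg hhv]
      by_cases hl : j = N - 1
      · rw [if_pos hl]
        rw [runsLoop, dif_neg (by omega : ¬ j + 1 < N)]
        rw [bGo, if_neg hhv, if_pos (hlast.mp hl)]
        simp
      · rw [if_neg hl]
        rw [bGo, if_neg hhv, if_neg (fun hnil => hl (hlast.mpr hnil))]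
        have := ihk (j + 1) v 1 (acc ++ [(h, c)]) (by omega) (by omega) hlen (by omega)
        rw [show ((j : Int) + 1).toNat = j.toNat + 1 by omega] at this
        rw [this]
        simp

-- phase-2 glue: the index/set loop equals the structural scan
theorem crossLoop_go (L : Int) (rest : List (Int × Int)) : ∀ (pre : List (Int × Int)) (ph pc : Int),
    crossLoop L (pre ++ (ph, pc) :: rest) (pre.length + 1) = runsScan L ph pc rest := by
  induction rest with
  | nil =>
    intro pre ph pc
    rw [crossLoop]
    simp [runsScan]
  | cons hc rest' ih =>
    obtain ⟨h, c⟩ := hc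
    intro pre ph pc
    rw [crossLoop]
    have hlen : pre.length + 1 < (pre ++ (ph, pc) :: (h, c) :: rest').length := by
      simp
    have hcur : (pre ++ (ph, pc) :: (h, c) :: rest')[pre.length + 1]'hlen = (h, c) := by
      rw [List.getElem_append_right (by omega)]
      simp
    have hprev : (pre ++ (ph, pc) :: (h, c) :: rest')[pre.length]'(by omega) = (ph, pc) := by
      rw [List.getElem_append_right (by omega)]
      simp
    simp only [hlen, dif_pos, if_neg (by omega : ¬ pre.length + 1 = 0)]
    simp only [Nat.add_sub_cancel, hcur, hprev]
    rw [runsScan]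
    by_cases h1 : 0 < h - ph ∧ h - ph < 2
    · simp only [if_pos h1]
      by_cases h2 : L ≤ pc
      · simp only [if_pos h2]
        have hset : (pre ++ (ph, pc) :: (h, c) :: rest').set pre.length (ph, pc - L)
            = (pre ++ [(ph, pc - L)]) ++ (h, c) :: rest' := by
          rw [List.set_append_right _ _ (by omega)]
          simp
        rw [hset]
        have := ih (pre ++ [(ph, pc - L)]) h c
        simpa using this
      · simp [h2]
    · simp only [if_neg h1]
      by_cases h3 : -2 < h - ph ∧ h - ph < 0
      · simp only [if_pos h3]
        by_cases h2 : L ≤ c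
        · simp only [if_pos h2]
          have hset : (pre ++ (ph, pc) :: (h, c) :: rest').set (pre.length + 1) (h, c - L)
              = (pre ++ [(ph, pc)]) ++ (h, c - L) :: rest' := by
            rw [List.set_append_right _ _ (by omega)]
            simp
          rw [hset]
          have := ih (pre ++ [(ph, pc)]) h (c - L)
          simpa using this
        · simp [h2]
      · rw [if_neg h3, if_neg h3]

theorem crossLoop_zero (L : Int) (runs : List (Int × Int)) :
    crossLoop L runs 0 = scanA L runs := by
  match runs with
  | [] => rw [crossLoop]; simp [scanA]
  | (h, c) :: rest =>
    rw [crossLoop]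
    simp only [List.length_cons, Nat.zero_lt_succ, dif_pos]
    have := crossLoop_go L rest [] h c
    simpa [scanA] using this

-- per-row equality
theorem row_eq (L N : Int) (row : List Int) (hN : 0 < N) (hlen : N ≤ (row.length : Int)) :
    crossLoop L (buildRuns row N) 0 =
      BV L ((PySem.List.pyGet? (PySem.List.slice row none (some N)) 0).getD 0) 1
        (PySem.List.slice (PySem.List.slice row none (some N)) (some 1) none) := by
  have hsl : PySem.List.slice row none (some N) = row.take N.toNat :=
    PySem.List.slice_to row (by omega)
  have hlen' : (row.take N.toNat).length = N.toNat := by simp; omega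
  have h0lt : 0 < (row.take N.toNat).length := by omega
  have hsl1 : PySem.List.slice (row.take N.toNat) (some 1) none = (row.take N.toNat).drop 1 := by
    rw [PySem.List.slice_from (row.take N.toNat) (by omega : (0 : Int) ≤ 1)]
    norm_num
  have hprev : (PySem.List.pyGet? (row.take N.toNat) 0).getD 0 = (row.take N.toNat)[0]'h0lt := by
    rw [PySem.List.pyGet?_eq_some_getElem _ le_rfl (by exact_mod_cast h0lt)]
    rfl
  have hbuild : buildRuns row N = bGo ((row.take N.toNat)[0]'h0lt) 1 ((row.take N.toNat).drop 1) := by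
    rw [buildRuns, if_pos hN]
    have h00 : (PySem.List.pyGet? row 0).getD 0 = (row.take N.toNat)[0]'h0lt := by
      rw [PySem.List.pyGet?_eq_some_getElem row le_rfl (by simp at hlen' ⊢; omega)]
      simp [List.getElem_take]
    rw [h00]
    have := runsLoop_eq row N (N - 1).toNat 1 ((row.take N.toNat)[0]'h0lt) 1 []
      (by omega) (by omega) hlen (by omega)
    simpa using this
  rw [hsl, hsl1, hprev, hbuild, crossLoop_zero]
  rcases hd : (row.take N.toNat).drop 1 with _ | ⟨v, vs⟩
  · rw [bGo]
    rw [show scanA L [] = true from rfl]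
    rw [show BV L ((row.take N.toNat)[0]'h0lt) 1 [] = true from rfl]
  · obtain ⟨c1, rest, hbg⟩ := bGo_cons_fst vs v ((row.take N.toNat)[0]'h0lt) 1
    rw [hbg]
    have hA : scanA L (((row.take N.toNat)[0]'h0lt, c1) :: rest)
        = AsideOf L false ((row.take N.toNat)[0]'h0lt) 1 (v :: vs) := by
      simp only [AsideOf, hbg, scanA, ARuns]
      rfl
    rw [hA, main_core L vs v ((row.take N.toNat)[0]'h0lt) 1 false le_rfl]
    rfl

-- ===== VERDICT (by name: the statement is the Claim_ definition above) =====
theorem calculate_road_spec : Claim_equal_calculate_road := by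
  intro N L matrix _hdom hpre
  obtain ⟨hNlen, hrows⟩ := hpre
  show calculate_road N L matrix = calculate_road_alt N L matrix
  rw [calculate_road, calculate_road_alt]
  simp only [List.foldl_map]
  apply PySem.List.foldl_congr_mem
  intro rc i hi
  rw [PySem.List.mem_pyRange_one] at hi
  have hN : 0 < N := by omega
  have hilen : i.toNat < matrix.length := by omega
  have hrow : (PySem.List.pyGet? matrix i).getD [] = matrix[i.toNat]'hilen := by
    rw [PySem.List.pyGet?_eq_some_getElem matrix (by omega) (by omega)]
    rfl
  have hmem : matrix[i.toNat]'hilen ∈ matrix.take N.toNat := by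
    have hlt : i.toNat < (matrix.take N.toNat).length := by simp; omega
    have : (matrix.take N.toNat)[i.toNat]'hlt = matrix[i.toNat]'hilen := List.getElem_take
    rw [← this]
    exact List.getElem_mem hlt
  have hrl : N ≤ ((matrix[i.toNat]'hilen).length : Int) := hrows _ hmem
  rw [hrow]
  have hre := row_eq L N (matrix[i.toNat]'hilen) hN hrl
  rcases ha : altRow L ((PySem.List.pyGet?
      (PySem.List.slice (matrix[i.toNat]'hilen) none (some N)) 0).getD 0) 1
      (PySem.List.slice (PySem.List.slice (matrix[i.toNat]'hilen) none (some N)) (some 1) none)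
      with _ | cnt
  · rw [hre]
    rw [show BV L ((PySem.List.pyGet?
        (PySem.List.slice (matrix[i.toNat]'hilen) none (some N)) 0).getD 0) 1
        (PySem.List.slice (PySem.List.slice (matrix[i.toNat]'hilen) none (some N)) (some 1) none)
        = false by rw [BV, ha]]
    simp
  · rw [hre]
    rw [show BV L ((PySem.List.pyGet?
        (PySem.List.slice (matrix[i.toNat]'hilen) none (some N)) 0).getD 0) 1
        (PySem.List.slice (PySem.List.slice (matrix[i.toNat]'hilen) none (some N)) (some 1) none)
        = decide (0 ≤ cnt) by rw [BV, ha]]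
    by_cases hc : 0 ≤ cnt <;> simp [hc]
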